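-- pv_equiv track=rewrite | github.com/ttzytt/PyAutoGrade | tests/Block 4/tested_code/21/Unit 1/Cards/card_functions.py | uno_who_played_what
-- ===== SOURCE A (Python) =====
-- def uno_who_played_what(cards_played, num_players=4,starting_player=1):
--
--     Featured_value = [0]*len(cards_played)
--
--     Signal = 1
--     if len(cards_played)!= 0:
--         if cards_played[0] == 'reverse':
--              Signal = -1
--
--     results = []
--     for i in range(num_players):
--         results.append([])
--     for i in range(1,len(cards_played)):
--
--         if cards_played[i-1] == 'skip':
--             Featured_value[i] = Featured_value[i-1] + 2*Signal
--
--         else: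
--             Featured_value[i] = Featured_value[i-1] + Signal
--
--         if cards_played[i] == 'reverse':
--             Signal = Signal * (-1)
--
--     for i in range(len(cards_played)):
--         for j in range(num_players):
--             if Featured_value[i] % num_players == j:
--                 results[(j+starting_player-1)%num_players].append(cards_played[i])
--     return results
-- ===== SOURCE B (Python) =====
-- def uno_who_played_what(cards_played, num_players=4, starting_player=1):
--     # One pass: track the running turn value and append each card directly to
--     # its player's pile, instead of scanning every player per card.
--     results = [[] for _ in range(num_players)]
--     if num_players <= 0 or not cards_played:
--         return results
--     first = cards_played[0]
--     sig = -1 if first == 'reverse' else 1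
--     fv = 0
--     results[(starting_player - 1) % num_players].append(first)
--     prev = first
--     for card in cards_played[1:]:
--         fv += (2 if prev == 'skip' else 1) * sig
--         results[(fv + starting_player - 1) % num_players].append(card)
--         if card == 'reverse':
--             sig = -sig
--         prev = card
--     return results
-- ===== Notes on version B (the rewrite author's own statement) =====
-- stated objective: faster
-- what changed: B computes each card's player index directly as (turn_value + starting_player - 1) % num_players in a single pass over the cards, instead of A's extra Featured_value array pass plus a scan over every player j for every card.
import Mathlib
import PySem

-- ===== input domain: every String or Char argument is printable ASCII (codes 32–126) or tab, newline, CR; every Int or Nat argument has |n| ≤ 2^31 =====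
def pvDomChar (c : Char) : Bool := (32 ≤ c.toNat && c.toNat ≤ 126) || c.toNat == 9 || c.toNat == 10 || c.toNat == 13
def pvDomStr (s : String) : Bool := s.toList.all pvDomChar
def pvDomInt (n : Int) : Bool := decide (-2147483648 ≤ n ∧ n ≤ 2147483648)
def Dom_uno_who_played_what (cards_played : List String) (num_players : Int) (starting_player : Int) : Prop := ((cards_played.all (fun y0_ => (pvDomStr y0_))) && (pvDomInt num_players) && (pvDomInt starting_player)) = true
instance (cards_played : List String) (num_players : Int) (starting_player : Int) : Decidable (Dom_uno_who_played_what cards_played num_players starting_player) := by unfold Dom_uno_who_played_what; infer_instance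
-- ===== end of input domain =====

-- B replaces A's inner scan over all players by direct indexing of the target
-- player in one pass (objective: faster, O(n+p) vs O(n·p)).

-- ===== PORT A =====
-- literal transliteration of A: Featured_value array built by the range(1, len) loop,
-- then the nested loop scanning every player j for each card.
def uno_who_played_what (cards_played : List String) (num_players : Int) (starting_player : Int) : List (List String) :=
  let n : Int := (cards_played.length : Int)
  let featured0 : List Int := List.replicate cards_played.length 0
  let signal0 : Int := 1
  let signal0 : Int :=
    if cards_played.length ≠ 0 then
      (if PySem.List.pyGetD cards_played 0 "" = "reverse" then -1 else signal0) else signal0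
  let results0 : List (List String) :=
    (PySem.List.pyRange 0 num_players 1).foldl (fun rs _ => rs ++ [[]]) []
  let st :=
    (PySem.List.pyRange 1 n 1).foldl (fun (st : List Int × Int) i =>
      let fv := st.1
      let sig := st.2
      let fv :=
        if PySem.List.pyGetD cards_played (i - 1) "" = "skip" then
          PySem.List.pySetD fv i (PySem.List.pyGetD fv (i - 1) 0 + 2 * sig)
        else
          PySem.List.pySetD fv i (PySem.List.pyGetD fv (i - 1) 0 + sig)
      let sig := if PySem.List.pyGetD cards_played i "" = "reverse" then sig * (-1) else sig
      (fv, sig)) (featured0, signal0)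
  let featured := st.1
  (PySem.List.pyRange 0 n 1).foldl (fun res i =>
    (PySem.List.pyRange 0 num_players 1).foldl (fun res j =>
      if PySem.Int.mod (PySem.List.pyGetD featured i 0) num_players = j then
        -- results[(j+starting_player-1)%num_players].append(…): the index is in
        -- [0, num_players) here (num_players > 0 inside this loop), so .toNat is exact
        res.modify (PySem.Int.mod (j + starting_player - 1) num_players).toNat
          (fun pile => pile ++ [PySem.List.pyGetD cards_played i ""])
      else res) res) results0

-- ===== PORT B =====
-- B-side helper: the for-loop over cards_played[1:], carrying (sig, fv, prev).
def unoDistribute (num_players starting_player : Int) (sig fv : Int) (prev : String)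
    (rest : List String) (acc : List (List String)) : List (List String) :=
  match rest with
  | [] => acc
  | card :: rest' =>
    let fv' := fv + (if prev = "skip" then 2 else 1) * sig
    let acc' := acc.modify (PySem.Int.mod (fv' + starting_player - 1) num_players).toNat
      (fun pile => pile ++ [card])
    let sig' := if card = "reverse" then -sig else sig
    unoDistribute num_players starting_player sig' fv' card rest' acc'

def uno_who_played_what_alt (cards_played : List String) (num_players : Int) (starting_player : Int) : List (List String) :=
  let results : List (List String) := (PySem.List.pyRange 0 num_players 1).map (fun _ => [])
  if num_players ≤ 0 then results
  else
    match cards_played with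
    | [] => results
    | first :: rest =>
      let sig : Int := if first = "reverse" then -1 else 1
      let results := results.modify (PySem.Int.mod (starting_player - 1) num_players).toNat
        (fun pile => pile ++ [first])
      unoDistribute num_players starting_player sig 0 first rest results

-- ===== PRECONDITION & SPEC =====
def Spec_uno_who_played_what (cards_played : List String) (num_players : Int) (starting_player : Int) (out : List (List String)) : Prop := out = uno_who_played_what_alt cards_played num_players starting_player
instance (cards_played : List String) (num_players : Int) (starting_player : Int) (out : List (List String)) : Decidable (Spec_uno_who_played_what cards_played num_players starting_player out) := by unfold Spec_uno_who_played_what; infer_instance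

-- ===== CLAIM (what is proved, stated in full; the proofs are below) =====
def Claim_equal_uno_who_played_what : Prop := ∀ (cards_played : List String) (num_players : Int) (starting_player : Int), Dom_uno_who_played_what cards_played num_players starting_player → Spec_uno_who_played_what cards_played num_players starting_player (uno_who_played_what cards_played num_players starting_player)

-- ===== LEMMAS AND PROOFS =====

-- the list of "Featured_value" entries for the cards after the first, mirroring B's running state
def unoFvs (sig fv : Int) (prev : String) (rest : List String) : List Int :=
  match rest with
  | [] => []
  | card :: rest' =>
    let fv' := fv + (if prev = "skip" then 2 else 1) * sig
    fv' :: unoFvs (if card = "reverse" then -sig else sig) fv' card rest'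

theorem length_unoFvs (sig fv : Int) (prev : String) (rest : List String) :
    (unoFvs sig fv prev rest).length = rest.length := by
  induction rest generalizing sig fv prev with
  | nil => rfl
  | cons c cs ih => simp [unoFvs, ih]

theorem foldl_self {α β : Type} (l : List β) (r : α) : l.foldl (fun r _ => r) r = r := by
  induction l generalizing r with
  | nil => rfl
  | cons x xs ih => exact ih r

theorem mod_shift (np : Int) (hnp : 0 < np) (m sp : Int) :
    PySem.Int.mod (PySem.Int.mod m np + sp - 1) np = PySem.Int.mod (m + sp - 1) np := by
  simp only [PySem.Int.mod_eq_emod_of_pos hnp]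
  have h1 : m % np + sp - 1 = m % np + (sp - 1) := by ring
  have h2 : m + sp - 1 = m + (sp - 1) := by ring
  rw [h1, h2]
  conv_rhs => rw [Int.add_emod]
  conv_lhs => rw [Int.add_emod, Int.emod_emod_of_dvd _ dvd_rfl]

-- A's inner scan over all players j hits exactly j = m % np
theorem foldl_hit {α : Type} (np : Int) (hnp : 0 < np) (m : Int) (g : Int → α → α) (res : α) :
    (PySem.List.pyRange 0 np 1).foldl
      (fun r j => if PySem.Int.mod m np = j then g j r else r) res
    = g (PySem.Int.mod m np) res := by
  set k := PySem.Int.mod m np with hk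
  have hk0 : 0 ≤ k := by
    rw [hk, PySem.Int.mod_eq_emod_of_pos hnp]; exact Int.emod_nonneg m (by omega)
  have hklt : k < np := by
    rw [hk, PySem.Int.mod_eq_emod_of_pos hnp]; exact Int.emod_lt_of_pos m hnp
  rw [PySem.List.pyRange_one_append 0 k np hk0 (le_of_lt hklt),
    PySem.List.pyRange_one_cons hklt, List.foldl_append, List.foldl_cons]
  have hpre : (PySem.List.pyRange 0 k 1).foldl
      (fun r j => if k = j then g j r else r) res = res := by
    rw [PySem.List.foldl_congr_mem _ _ (fun r (_ : Int) => r) _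
      (by intro acc x hx; rw [PySem.List.mem_pyRange_one] at hx
          simp only [if_neg (by omega : ¬ k = x)])]
    exact foldl_self _ _
  rw [hpre, if_pos rfl]
  rw [PySem.List.foldl_congr_mem _ _ (fun r (_ : Int) => r) _
    (by intro acc x hx; rw [PySem.List.mem_pyRange_one] at hx
        simp only [if_neg (by omega : ¬ k = x)])]
  exact foldl_self _ _

theorem inner_collapse (np sp : Int) (hnp : 0 < np) (m : Int) (card : String)
    (res : List (List String)) :
    (PySem.List.pyRange 0 np 1).foldl
      (fun res j => if PySem.Int.mod m np = j then
        res.modify (PySem.Int.mod (j + sp - 1) np).toNat (fun pile => pile ++ [card])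
      else res) res
    = res.modify (PySem.Int.mod (m + sp - 1) np).toNat (fun pile => pile ++ [card]) := by
  rw [foldl_hit np hnp m
    (fun j res => res.modify (PySem.Int.mod (j + sp - 1) np).toNat (fun pile => pile ++ [card])) res]
  rw [mod_shift np hnp]

theorem map_pyRange_zip (cards : List String) (fvl : List Int) (h : fvl.length = cards.length) :
    (PySem.List.pyRange 0 (cards.length : Int) 1).map
      (fun i => (PySem.List.pyGetD cards i "", PySem.List.pyGetD fvl i 0))
    = cards.zip fvl := by
  apply List.ext_getElem
  · simp [PySem.List.length_pyRange_one, h]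
  · intro k hk1 hk2
    have hklen : k < cards.length := by
      simpa [PySem.List.length_pyRange_one] using hk1
    simp only [List.getElem_map, PySem.List.getElem_pyRange_one, List.getElem_zip]
    have : (0 : Int) + (k : Int) = ((k : Nat) : Int) := by omega
    rw [this, PySem.List.pyGetD_natCast, PySem.List.pyGetD_natCast,
      List.getD_eq_getElem _ _ hklen, List.getD_eq_getElem _ _ (by omega)]

-- B's loop equals a fold over the cards paired with their featured values
theorem unoDistribute_eq (np sp : Int) :
    ∀ (rest : List String) (sig fv : Int) (prev : String) (acc : List (List String)),
    unoDistribute np sp sig fv prev rest acc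
    = (rest.zip (unoFvs sig fv prev rest)).foldl
        (fun res p => res.modify (PySem.Int.mod (p.2 + sp - 1) np).toNat
          (fun pile => pile ++ [p.1])) acc := by
  intro rest
  induction rest with
  | nil => intro sig fv prev acc; rfl
  | cons c cs ih =>
    intro sig fv prev acc
    simp only [unoDistribute, unoFvs, List.zip_cons_cons, List.foldl_cons]
    exact ih _ _ _ _

-- A's array-building loop, generalized: invariant over the processed prefix
theorem loop1_gen (cards : List String) :
    ∀ (rest : List String) (done : List Int) (sig fv : Int) (prev : String),
    done ≠ [] →
    cards.drop done.length = rest →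
    cards[done.length - 1]? = some prev →
    done.getLast? = some fv →
    ((PySem.List.pyRange (done.length : Int) (cards.length : Int) 1).foldl
      (fun (st : List Int × Int) i =>
        let fv := st.1
        let sig := st.2
        let fv :=
          if PySem.List.pyGetD cards (i - 1) "" = "skip" then
            PySem.List.pySetD fv i (PySem.List.pyGetD fv (i - 1) 0 + 2 * sig)
          else
            PySem.List.pySetD fv i (PySem.List.pyGetD fv (i - 1) 0 + sig)
        let sig := if PySem.List.pyGetD cards i "" = "reverse" then sig * (-1) else sig
        (fv, sig))
      (done ++ List.replicate rest.length 0, sig)).1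
    = done ++ unoFvs sig fv prev rest := by
  intro rest
  induction rest with
  | nil =>
    intro done sig fv prev hne hdrop hprev hlast
    have hlen : cards.length ≤ done.length := by
      have := congrArg List.length hdrop; simp at this; omega
    rw [PySem.List.pyRange_one_eq_nil (by exact_mod_cast hlen)]
    simp [unoFvs]
  | cons c' rest' ih =>
    intro done sig fv prev hne hdrop hprev hlast
    have hdl : 0 < done.length := List.length_pos_iff.mpr hne
    have hlt : done.length < cards.length := by
      have := congrArg List.length hdrop; simp at this; omega
    have hc' : cards[done.length]? = some c' := by
      have h2 := congrArg (fun l => l[0]?) hdrop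
      simp only [List.getElem?_drop, Nat.add_zero, List.getElem?_cons_zero] at h2
      exact h2
    rw [PySem.List.pyRange_one_cons (by exact_mod_cast hlt), List.foldl_cons]
    -- evaluate one step of the loop
    have hidx : ((done.length : Int) - 1) = ((done.length - 1 : Nat) : Int) := by omega
    have hprev' : PySem.List.pyGetD cards ((done.length : Int) - 1) "" = prev := by
      rw [hidx, PySem.List.pyGetD_natCast]
      rw [List.getD_eq_getElem?_getD, hprev]; rfl
    have hfvread : ∀ (tail : List Int),
        PySem.List.pyGetD (done ++ tail) ((done.length : Int) - 1) 0 = fv := by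
      intro tail
      rw [hidx, PySem.List.pyGetD_natCast, List.getD_eq_getElem?_getD,
        List.getElem?_append_left (by omega)]
      rw [List.getLast?_eq_getElem?] at hlast
      rw [hlast]; rfl
    have hset : ∀ (v : Int),
        PySem.List.pySetD (done ++ List.replicate (c' :: rest').length 0) (done.length : Int) v
        = (done ++ [v]) ++ List.replicate rest'.length 0 := by
      intro v
      rw [PySem.List.pySetD_natCast, List.set_append]
      simp [List.replicate_succ]
    have hcget : PySem.List.pyGetD cards (done.length : Int) "" = c' := by
      rw [PySem.List.pyGetD_natCast, List.getD_eq_getElem?_getD, hc']; rfl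
    simp only [hprev', hfvread, hset, hcget]
    -- the two set branches combine to the single unoFvs value
    set v : Int := fv + (if prev = "skip" then 2 else 1) * sig with hv
    have hbranch : (if prev = "skip" then (done ++ [fv + 2 * sig]) ++ List.replicate rest'.length 0
        else (done ++ [fv + sig]) ++ List.replicate rest'.length 0)
        = (done ++ [v]) ++ List.replicate rest'.length 0 := by
      rw [hv]; split_ifs <;> ring_nf
    set sig' : Int := if c' = "reverse" then -sig else sig with hsig'
    have hsigbranch : (if c' = "reverse" then sig * (-1) else sig) = sig' := by
      rw [hsig']; split_ifs <;> ring
    rw [hbranch, hsigbranch]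
    have hdrop2 : cards.drop (done ++ [v]).length = rest' := by
      have h2 := congrArg (List.drop 1) hdrop
      rw [List.drop_drop] at h2
      simpa [Nat.add_comm] using h2
    have hprev2 : cards[(done ++ [v]).length - 1]? = some c' := by
      simpa using hc'
    have hlast2 : (done ++ [v]).getLast? = some v := by simp
    have hcast : ((done.length : Int) + 1) = (((done ++ [v]).length : Nat) : Int) := by
      simp
    rw [hcast, ih (done ++ [v]) sig' v c' (by simp) hdrop2 hprev2 hlast2]
    simp [unoFvs, List.append_assoc, hv, hsig']
  

theorem uno_eq (cards : List String) (np sp : Int) :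
    uno_who_played_what cards np sp = uno_who_played_what_alt cards np sp := by
  by_cases hnp : np ≤ 0
  · unfold uno_who_played_what uno_who_played_what_alt
    simp only [PySem.List.pyRange_one_eq_nil hnp, List.foldl_nil, List.map_nil, if_pos hnp]
    exact foldl_self _ _
  · replace hnp : 0 < np := by omega
    unfold uno_who_played_what uno_who_played_what_alt
    rw [if_neg (by omega)]
    cases cards with
    | nil =>
      simp only [List.length_nil, Nat.cast_zero, List.replicate_zero]
      rw [PySem.List.pyRange_one_eq_nil (le_refl 0)]
      simp only [List.foldl_nil]
      rw [PySem.List.foldl_append_singleton_eq_map (fun _ => ([] : List String))]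
      simp
    | cons c cs =>
      simp only [List.length_cons, ne_eq, Nat.succ_ne_zero, not_false_iff, if_true,
        PySem.List.pyGetD_zero_cons,
        PySem.List.foldl_append_singleton_eq_map (fun _ => ([] : List String)),
        List.nil_append]
      set sig1 : Int := if c = "reverse" then -1 else 1 with hsig1
      -- A's array-building loop yields 0 :: unoFvs sig1 0 c cs
      have hfeat := loop1_gen (c :: cs) cs [0] sig1 0 c (by simp) (by simp) (by simp) (by simp)
      simp only [List.length_cons, List.length_nil, Nat.cast_one, List.singleton_append,
        Nat.zero_add] at hfeat
      rw [show List.replicate (cs.length + 1) (0 : Int) = 0 :: List.replicate cs.length 0 from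
        List.replicate_succ]
      rw [hfeat]
      simp only [inner_collapse np sp hnp]
      have hzip := map_pyRange_zip (c :: cs) (0 :: unoFvs sig1 0 c cs)
        (by simp [length_unoFvs])
      simp only [List.length_cons] at hzip
      have hA : ∀ init : List (List String),
          (PySem.List.pyRange 0 ((cs.length + 1 : Nat) : Int) 1).foldl
            (fun res i => res.modify
              (PySem.Int.mod (PySem.List.pyGetD (0 :: unoFvs sig1 0 c cs) i 0 + sp - 1) np).toNat
              (fun pile => pile ++ [PySem.List.pyGetD (c :: cs) i ""])) init
          = ((c :: cs).zip (0 :: unoFvs sig1 0 c cs)).foldl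
              (fun res p => res.modify (PySem.Int.mod (p.2 + sp - 1) np).toNat
                (fun pile => pile ++ [p.1])) init := by
        intro init
        rw [← hzip, List.foldl_map]
      rw [hA, List.zip_cons_cons, List.foldl_cons, unoDistribute_eq]
      simp only [zero_add]

-- ===== VERDICT (by name: the statement is the Claim_ definition above) =====
theorem uno_who_played_what_spec : Claim_equal_uno_who_played_what := by
  intro cards np sp _
  unfold Spec_uno_who_played_what
  exact uno_eq cards np sp
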